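-- pv_equiv track=rewrite | github.com/GuillaumeGatti/MOM_GEO_2020 | seismic.py | clust_temp
-- ===== SOURCE A (Python) =====
-- def clust_temp(sec, delta_t):
--     lab_t = [0]
--     n = 0
--     for t in range(0, len(sec) - 1):
--         if abs(sec[t] - sec[t + 1]) < delta_t:
--             lab_t += [n]
--         else:
--             n += 1
--             lab_t += [n]
--     return lab_t
-- ===== SOURCE B (Python) =====
-- def clust_temp(sec, delta_t):
--     breaks = [0] + [1 if abs(a - b) >= delta_t else 0 for a, b in zip(sec, sec[1:])]
--     out = []
--     total = 0
--     for x in breaks: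
--         total += x
--         out.append(total)
--     return out
-- ===== Notes on version B (the rewrite author's own statement) =====
-- stated objective: alternative
-- what changed: A fuses detection and labelling in one indexed loop carrying the current label; B first builds a 0/1 break-indicator list over adjacent pairs (via zip) and then integrates it with a running prefix sum.
import Mathlib
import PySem

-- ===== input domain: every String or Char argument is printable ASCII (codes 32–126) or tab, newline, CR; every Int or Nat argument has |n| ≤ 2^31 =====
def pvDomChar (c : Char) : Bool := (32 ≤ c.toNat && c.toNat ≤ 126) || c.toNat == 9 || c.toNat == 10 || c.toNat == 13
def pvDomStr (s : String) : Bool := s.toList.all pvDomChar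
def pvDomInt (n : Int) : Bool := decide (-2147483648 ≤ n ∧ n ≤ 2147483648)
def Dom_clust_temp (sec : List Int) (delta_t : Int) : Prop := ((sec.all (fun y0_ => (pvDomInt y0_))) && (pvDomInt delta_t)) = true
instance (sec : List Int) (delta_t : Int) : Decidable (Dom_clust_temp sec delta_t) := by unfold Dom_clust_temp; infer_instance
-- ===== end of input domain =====

-- B builds a 0/1 break-indicator list over adjacent pairs and then prefix-sums it,
-- instead of A's fused loop carrying the current label; alternative decomposition, same cost.

-- ===== PORT A =====
-- for t in range(0, len(sec)-1): append n or n+1 depending on |sec[t]-sec[t+1]| < delta_t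
def clust_temp (sec : List Int) (delta_t : Int) : List Int :=
  ((PySem.List.pyRange 0 ((sec.length : Int) - 1) 1).foldl
    (fun (st : List Int × Int) t =>
      if |PySem.List.pyGetD sec t 0 - PySem.List.pyGetD sec (t + 1) 0| < delta_t then
        (st.1 ++ [st.2], st.2)
      else
        (st.1 ++ [st.2 + 1], st.2 + 1))
    ([0], 0)).1

-- ===== PORT B =====
-- breaks = [0] + [1 if abs(a-b) >= delta_t else 0 for a,b in zip(sec, sec[1:])]; prefix sums of breaks
def clust_temp_alt (sec : List Int) (delta_t : Int) : List Int :=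
  let breaks : List Int :=
    0 :: (sec.zip (PySem.List.slice sec (some 1) none)).map
      (fun ab => if delta_t ≤ |ab.1 - ab.2| then (1 : Int) else 0)
  (breaks.foldl (fun (st : List Int × Int) x => (st.1 ++ [st.2 + x], st.2 + x)) ([], 0)).1

-- ===== PRECONDITION & SPEC =====
def Spec_clust_temp (sec : List Int) (delta_t : Int) (out : List Int) : Prop := out = clust_temp_alt sec delta_t
instance (sec : List Int) (delta_t : Int) (out : List Int) : Decidable (Spec_clust_temp sec delta_t out) := by unfold Spec_clust_temp; infer_instance

-- ===== CLAIM (what is proved, stated in full; the proofs are below) =====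
def Claim_equal_clust_temp : Prop := ∀ (sec : List Int) (delta_t : Int), Dom_clust_temp sec delta_t → Spec_clust_temp sec delta_t (clust_temp sec delta_t)

-- ===== LEMMAS AND PROOFS =====

-- the index range in A enumerates exactly the adjacent pairs of sec
theorem pv_pair_map (sec : List Int) :
    (PySem.List.pyRange 0 ((sec.length : Int) - 1) 1).map
      (fun t => (PySem.List.pyGetD sec t 0, PySem.List.pyGetD sec (t + 1) 0))
      = sec.zip (sec.drop 1) := by
  rcases sec with _ | ⟨a, rest⟩
  · simp [PySem.List.pyRange_one_eq_nil]
  · have hlen : ((a :: rest).length : Int) - 1 = ((rest.length : Nat) : Int) := by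
      simp
    rw [hlen, PySem.List.pyRange_zero_natCast]
    apply List.ext_getElem
    · simp
    · intro k h1 h2
      simp only [List.getElem_map, List.getElem_range, List.getElem_zip]
      have hk : k < rest.length := by simpa using h1
      have e1 : PySem.List.pyGetD (a :: rest) ((k : Int)) 0 = (a :: rest)[k] := by
        rw [PySem.List.pyGetD_natCast]
        exact List.getD_eq_getElem _ _ (by simp [Nat.lt_succ_of_lt hk])
      have e2 : PySem.List.pyGetD (a :: rest) ((k : Int) + 1) 0 = (a :: rest)[k + 1] := by
        have : ((k : Int) + 1) = ((k + 1 : Nat) : Int) := by push_cast; ring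
        rw [this, PySem.List.pyGetD_natCast]
        exact List.getD_eq_getElem _ _ (by simpa using hk)
      simp only [e1, e2]
      simp

-- folding A's step over a list of pairs equals folding B's prefix-sum step over the indicators
theorem pv_fold_eq (delta_t : Int) (ps : List (Int × Int)) :
    ∀ (acc : List Int) (n : Int),
      ps.foldl
        (fun (st : List Int × Int) p =>
          if |p.1 - p.2| < delta_t then (st.1 ++ [st.2], st.2)
          else (st.1 ++ [st.2 + 1], st.2 + 1)) (acc, n)
      = (ps.map (fun ab => if delta_t ≤ |ab.1 - ab.2| then (1 : Int) else 0)).foldl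
          (fun (st : List Int × Int) x => (st.1 ++ [st.2 + x], st.2 + x)) (acc, n) := by
  induction ps with
  | nil => intro acc n; rfl
  | cons p ps ih =>
    intro acc n
    simp only [List.foldl_cons, List.map_cons]
    by_cases h : |p.1 - p.2| < delta_t
    · rw [if_pos h, if_neg (by omega)]
      simpa using ih (acc ++ [n]) n
    · rw [if_neg h, if_pos (by omega)]
      exact ih (acc ++ [n + 1]) (n + 1)

-- ===== VERDICT (by name: the statement is the Claim_ definition above) =====
theorem clust_temp_spec : Claim_equal_clust_temp := by
  intro sec delta_t _
  unfold Spec_clust_temp clust_temp clust_temp_alt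
  rw [PySem.List.slice_from_one, ← List.drop_one]
  have key :
      ((PySem.List.pyRange 0 ((sec.length : Int) - 1) 1).map
          (fun t => (PySem.List.pyGetD sec t 0, PySem.List.pyGetD sec (t + 1) 0))).foldl
          (fun (st : List Int × Int) p =>
            if |p.1 - p.2| < delta_t then (st.1 ++ [st.2], st.2)
            else (st.1 ++ [st.2 + 1], st.2 + 1)) ([0], 0)
      = (PySem.List.pyRange 0 ((sec.length : Int) - 1) 1).foldl
        (fun (st : List Int × Int) t =>
          if |PySem.List.pyGetD sec t 0 - PySem.List.pyGetD sec (t + 1) 0| < delta_t then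
            (st.1 ++ [st.2], st.2)
          else (st.1 ++ [st.2 + 1], st.2 + 1)) ([0], 0) := by
    rw [List.foldl_map]
  rw [← key, pv_pair_map, pv_fold_eq delta_t]
  simp [List.foldl_cons]
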